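-- pv_equiv track=rewrite | github.com/vinchinzu/euler | python/838.py | build_prefix_bipartite
-- ===== SOURCE A (Python) =====
-- import bisect
-- from typing import Deque, Iterable, List, Set, Tuple
--
-- def build_prefix_bipartite(
--     primes: List[int], N: int, forced: Set[int]
-- ) -> Tuple[List[int], List[int], List[int]]:
--     """
--     Build the bipartite graph that remains after forcing.
--
--     Left side: primes p % 10 == 7, not forced, and p*19 <= N (since smallest prime == 9 mod 10 is 19).
--     Right side: primes q % 10 == 9 up to N // min_left.
--
--     Edge (p,q) exists iff p*q <= N.
--     For each p, the neighbors are exactly the prefix of right primes with q <= N//p.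
--     We store that as prefix lengths.
--     """
--     left = [p for p in primes if (p % 10 == 7) and (p not in forced) and (p * 19 <= N)]
--     left.sort()
--     if not left:
--         return [], [], []
--
--     pmin = left[0]
--     right = [q for q in primes if (q % 10 == 9) and (q <= N // pmin)]
--     right.sort()
--
--     pref_len = []
--     for p in left:
--         lim = N // p
--         pref_len.append(bisect.bisect_right(right, lim))
--     return left, right, pref_len
-- ===== SOURCE B (Python) =====
-- def build_prefix_bipartite(primes, N, forced):
--     # Sort the prime list ONCE and derive both sides by filtering the sorted
--     # list (A filters twice and sorts each side); replace the per-element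
--     # bisect_right by a single monotone two-pointer sweep over right across
--     # the sorted distinct limits N//p, then read each answer from a table.
--     sp = sorted(primes)
--     left = [p for p in sp if p % 10 == 7 and p not in forced and p * 19 <= N]
--     if not left:
--         return [], [], []
--     cap = N // left[0]
--     right = [q for q in sp if q % 10 == 9 and q <= cap]
--     cnt = {}
--     j = 0
--     for lim in sorted(set(N // p for p in left)):
--         while j < len(right) and right[j] <= lim:
--             j += 1
--         cnt[lim] = j
--     return left, right, [cnt[N // p] for p in left]
-- ===== Notes on version B (the rewrite author's own statement) =====
-- stated objective: alternative
-- what changed: B sorts the prime list once and derives both sides by filtering the already-sorted list (A filters twice and sorts each side), and replaces the per-element bisect_right binary searches by one monotone two-pointer sweep over right across the sorted distinct limits N//p, read back from a table.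
import Mathlib
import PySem

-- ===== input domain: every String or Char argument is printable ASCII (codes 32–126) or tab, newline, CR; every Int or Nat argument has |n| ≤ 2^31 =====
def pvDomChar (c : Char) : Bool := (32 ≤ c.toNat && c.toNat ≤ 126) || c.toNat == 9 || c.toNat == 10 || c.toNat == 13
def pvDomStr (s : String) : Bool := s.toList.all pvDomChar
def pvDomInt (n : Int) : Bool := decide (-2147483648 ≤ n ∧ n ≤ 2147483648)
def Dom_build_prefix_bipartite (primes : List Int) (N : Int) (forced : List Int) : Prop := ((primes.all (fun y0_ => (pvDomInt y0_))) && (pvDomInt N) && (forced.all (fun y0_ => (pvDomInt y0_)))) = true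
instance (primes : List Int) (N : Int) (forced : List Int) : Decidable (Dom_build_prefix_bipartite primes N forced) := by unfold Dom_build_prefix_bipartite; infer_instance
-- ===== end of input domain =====

-- B sorts the prime list once and filters the sorted list for both sides, and counts
-- right-primes ≤ N//p instead of bisecting; alternative structure, same results.


-- ===== PORT A =====
-- left = sorted([p for p in primes if p%10==7 and p not in forced and p*19<=N]);
-- right = sorted([q for q in primes if q%10==9 and q<=N//left[0]]);
-- pref_len appended per p via bisect.bisect_right(right, N//p).
def build_prefix_bipartite (primes : List Int) (N : Int) (forced : List Int) : List (List Int) :=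
  let left := PySem.List.sorted (primes.filter (fun p =>
      PySem.Int.mod p 10 == 7 && !(forced.contains p) && decide (p * 19 ≤ N))) (fun x => x) false
  match left with
  | [] => [[], [], []]
  | pmin :: _ =>
    let right := PySem.List.sorted (primes.filter (fun q =>
        PySem.Int.mod q 10 == 9 && decide (q ≤ PySem.Int.floordiv N pmin))) (fun x => x) false
    let pref := left.foldl (fun acc p =>
        acc ++ [((PySem.List.bisectRight right (PySem.Int.floordiv N p) : Nat) : Int)]) []
    [left, right, pref]

-- ===== PORT B =====
-- sp = sorted(primes); left/right are filters of sp; cnt is built by one monotone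
-- two-pointer sweep over right across the sorted distinct limits; pref_len reads cnt.
-- while j < len(right) and right[j] <= lim: j += 1
def pvAdvance (right : List Int) (lim : Int) (j : Nat) : Nat :=
  if h : j < right.length then
    if right[j] ≤ lim then pvAdvance right lim (j + 1) else j
  else j
termination_by right.length - j
decreasing_by omega

def build_prefix_bipartite_alt (primes : List Int) (N : Int) (forced : List Int) : List (List Int) :=
  let sp := PySem.List.sorted primes (fun x => x) false
  let left := sp.filter (fun p =>
      PySem.Int.mod p 10 == 7 && !(forced.contains p) && decide (p * 19 ≤ N))
  match left with
  | [] => [[], [], []]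
  | p0 :: _ =>
    let cap := PySem.Int.floordiv N p0
    let right := sp.filter (fun q => PySem.Int.mod q 10 == 9 && decide (q ≤ cap))
    -- for lim in sorted(set(N//p for p in left)): advance j; cnt[lim] = j
    let st := (PySem.List.sorted (PySem.Set.ofList
          (left.map (fun p => PySem.Int.floordiv N p))) (fun x => x) false).foldl
        (fun (st : Nat × PySem.Dict Int Int) lim =>
          let j := pvAdvance right lim st.1
          (j, st.2.insert lim (j : Int))) ((0 : Nat), (PySem.Dict.empty : PySem.Dict Int Int))
    -- cnt[N//p]: the key N//p is always in cnt (it is one of the limits swept above),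
    -- so the .getD 0 default making the lookup total is never taken
    let pref := left.map (fun p => (st.2.get? (PySem.Int.floordiv N p)).getD 0)
    [left, right, pref]

-- ===== PRECONDITION & SPEC =====
def Spec_build_prefix_bipartite (primes : List Int) (N : Int) (forced : List Int) (out : List (List Int)) : Prop := out = build_prefix_bipartite_alt primes N forced
instance (primes : List Int) (N : Int) (forced : List Int) (out : List (List Int)) : Decidable (Spec_build_prefix_bipartite primes N forced out) := by unfold Spec_build_prefix_bipartite; infer_instance

-- ===== CLAIM (what is proved, stated in full; the proofs are below) =====
def Claim_equal_build_prefix_bipartite : Prop := ∀ (primes : List Int) (N : Int) (forced : List Int), Dom_build_prefix_bipartite primes N forced → Spec_build_prefix_bipartite primes N forced (build_prefix_bipartite primes N forced)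

-- ===== LEMMAS AND PROOFS =====

-- sorting a filtered list = filtering the sorted list (key = identity)
theorem pv_sorted_filter (P : Int → Bool) (xs : List Int) :
    PySem.List.sorted (xs.filter P) (fun x => x) false
      = (PySem.List.sorted xs (fun x => x) false).filter P := by
  apply PySem.List.eq_of_perm_of_pairwise_le_of_injective (fun x : Int => x)
    (fun a b h => h)
  · exact (PySem.List.sorted_perm _ _ _).trans
      ((PySem.List.sorted_perm xs _ _).filter P).symm
  · exact PySem.List.sorted_pairwise _ _
  · exact (PySem.List.sorted_pairwise xs _).filter _

-- a position characterised as "everything before k is ≤ x, everything from k on is > x"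
-- is the count of elements ≤ x
theorem pv_count_eq (a : List Int) (x : Int) (k : Nat) (hk : k ≤ a.length)
    (hlt : ∀ (j : Nat) (hj : j < a.length), j < k → a[j] ≤ x)
    (hge : ∀ (j : Nat) (hj : j < a.length), k ≤ j → x < a[j]) :
    a.countP (fun q => decide (q ≤ x)) = k := by
  rw [← List.take_append_drop k a, List.countP_append]
  have h1 : (a.take k).countP (fun q => decide (q ≤ x)) = k := by
    rw [List.countP_eq_length.mpr]
    · simp [List.length_take, Nat.min_eq_left hk]
    · intro y hy
      obtain ⟨j, hj, rfl⟩ := List.getElem_of_mem hy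
      have hjk : j < k := lt_of_lt_of_le hj (by simp [List.length_take])
      have hjl : j < a.length := lt_of_lt_of_le hj (by simp [List.length_take, hk])
      rw [List.getElem_take]
      simpa using hlt j hjl hjk
  have h2 : (a.drop k).countP (fun q => decide (q ≤ x)) = 0 := by
    rw [List.countP_eq_zero]
    intro y hy
    obtain ⟨j, hj, rfl⟩ := List.getElem_of_mem hy
    have hjl : k + j < a.length := by
      have := hj; simp [List.length_drop] at this; omega
    rw [List.getElem_drop]
    simpa using not_le.mpr (hge (k + j) hjl (Nat.le_add_right _ _))
  omega

-- in a sorted list, every position below the count of elements ≤ x holds an element ≤ x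
theorem pv_le_of_lt_count (a : List Int) (x : Int) (h : a.Pairwise (· ≤ ·))
    (i : Nat) (hi : i < a.length) (hic : i < a.countP (fun q => decide (q ≤ x))) :
    a[i] ≤ x := by
  by_contra hgt
  push Not at hgt
  have hdrop : (a.drop i).countP (fun q => decide (q ≤ x)) = 0 := by
    rw [List.countP_eq_zero]
    intro y hy
    obtain ⟨j, hj, rfl⟩ := List.getElem_of_mem hy
    have hjl : i + j < a.length := by
      have := hj; simp [List.length_drop] at this; omega
    rw [List.getElem_drop]
    have hle : a[i] ≤ a[i + j] := by
      rcases Nat.eq_or_lt_of_le (Nat.le_add_right i j) with heq | hlt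
      · simp [← heq]
      · exact List.pairwise_iff_getElem.mp h i (i + j) hi hjl hlt
    simpa using not_le.mpr (lt_of_lt_of_le hgt hle)
  have := List.countP_le_length (p := fun q => decide (q ≤ x)) (l := a.take i)
  have hsplit : a.countP (fun q => decide (q ≤ x))
      = (a.take i).countP (fun q => decide (q ≤ x))
        + (a.drop i).countP (fun q => decide (q ≤ x)) := by
    rw [← List.countP_append, List.take_append_drop]
  simp [List.length_take] at this
  omega

-- the while loop: from any j whose prefix is all ≤ lim, pvAdvance reaches the count
theorem pv_advance_eq (a : List Int) (x : Int) (j : Nat) (h : a.Pairwise (· ≤ ·))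
    (hjlen : j ≤ a.length)
    (hj : ∀ (i : Nat) (hi : i < a.length), i < j → a[i] ≤ x) :
    pvAdvance a x j = a.countP (fun q => decide (q ≤ x)) := by
  rw [pvAdvance]
  split
  · rename_i hlt
    split
    · rename_i hle
      exact pv_advance_eq a x (j + 1) h hlt (by
        intro i hi hij
        rcases Nat.lt_succ_iff_lt_or_eq.mp hij with hij' | rfl
        · exact hj i hi hij'
        · exact hle)
    · rename_i hgt
      push Not at hgt
      refine (pv_count_eq a x j hjlen hj ?_).symm
      intro i hi hij
      rcases Nat.eq_or_lt_of_le hij with rfl | hlt'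
      · exact hgt
      · exact lt_of_lt_of_le hgt (List.pairwise_iff_getElem.mp h j i (by omega) hi hlt')
  · rename_i hge
    push Not at hge
    have hj' : j = a.length := le_antisymm hjlen hge
    refine (pv_count_eq a x j hjlen hj ?_).symm
    intro i hi hij
    omega
termination_by a.length - j
decreasing_by omega

-- folding limits that do not contain x leaves x's table entry alone
theorem pv_fold_preserve (a : List Int) (ls : List Int) (x : Int) (hx : x ∉ ls)
    (j0 : Nat) (d0 : PySem.Dict Int Int) :
    PySem.Dict.get? (ls.foldl (fun (st : Nat × PySem.Dict Int Int) lim =>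
        (pvAdvance a lim st.1, st.2.insert lim ((pvAdvance a lim st.1 : Nat) : Int))) (j0, d0)).2 x
      = PySem.Dict.get? d0 x := by
  induction ls generalizing j0 d0 with
  | nil => rfl
  | cons l rest ih =>
    simp only [List.foldl_cons]
    rw [ih (fun h => hx (List.mem_cons_of_mem l h)),
      PySem.Dict.get?_insert_of_ne _ _ (fun h => hx (by rw [h]; exact List.mem_cons_self))]

-- the sweep fold: afterwards the table maps every limit in the list to the count
theorem pv_fold_get? (a : List Int) (ha : a.Pairwise (· ≤ ·))
    (ls : List Int) (hls : ls.Pairwise (· < ·))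
    (j0 : Nat) (d0 : PySem.Dict Int Int) (hj0len : j0 ≤ a.length)
    (hj0 : ∀ l ∈ ls, ∀ (i : Nat) (hi : i < a.length), i < j0 → a[i] ≤ l)
    (x : Int) (hx : x ∈ ls) :
    PySem.Dict.get? (ls.foldl (fun (st : Nat × PySem.Dict Int Int) lim =>
        (pvAdvance a lim st.1, st.2.insert lim ((pvAdvance a lim st.1 : Nat) : Int))) (j0, d0)).2 x
      = some ((a.countP (fun q => decide (q ≤ x)) : Nat) : Int) := by
  induction ls generalizing j0 d0 with
  | nil => cases hx
  | cons l rest ih =>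
    simp only [List.foldl_cons]
    have hj1 : pvAdvance a l j0 = a.countP (fun q => decide (q ≤ l)) :=
      pv_advance_eq a l j0 ha hj0len (hj0 l List.mem_cons_self)
    rcases List.mem_cons.mp hx with rfl | hx'
    · have hnot : x ∉ rest := by
        intro hmem
        exact lt_irrefl x ((List.pairwise_cons.mp hls).1 x hmem)
      rw [pv_fold_preserve a rest x hnot, PySem.Dict.get?_insert_self, hj1]
    · refine ih (List.Pairwise.of_cons hls) (pvAdvance a l j0)
        (d0.insert l ((pvAdvance a l j0 : Nat) : Int))
        (by rw [hj1]; exact List.countP_le_length) ?_ hx'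
      intro l2 hl2 i hi hilt
      rw [hj1] at hilt
      have hxl : a[i] ≤ l := pv_le_of_lt_count a l ha i hi hilt
      have hll2 : l < l2 := (List.pairwise_cons.mp hls).1 l2 hl2
      exact le_of_lt (lt_of_le_of_lt hxl hll2)

theorem build_prefix_bipartite_spec : Claim_equal_build_prefix_bipartite := by
  intro primes N forced _
  unfold Spec_build_prefix_bipartite build_prefix_bipartite build_prefix_bipartite_alt
  simp only
  rw [pv_sorted_filter]
  cases hL : (PySem.List.sorted primes (fun x => x) false).filter (fun p =>
      PySem.Int.mod p 10 == 7 && !(forced.contains p) && decide (p * 19 ≤ N)) with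
  | nil => rfl
  | cons p0 t =>
    dsimp only
    rw [pv_sorted_filter]
    have hsorted : (((PySem.List.sorted primes (fun x => x) false)).filter
        (fun q => PySem.Int.mod q 10 == 9 && decide (q ≤ PySem.Int.floordiv N p0))).Pairwise (· ≤ ·) :=
      (PySem.List.sorted_pairwise primes _).filter _
    rw [PySem.List.foldl_append_singleton_eq_map]
    simp only [List.nil_append]
    congr 3
    apply List.map_congr_left
    intro p hp
    obtain ⟨hk, hlt, hge⟩ := PySem.List.bisectRight_spec _ (PySem.Int.floordiv N p) hsorted
    have hcnt := pv_count_eq _ (PySem.Int.floordiv N p) _ hk hlt hge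
    have hmem : PySem.Int.floordiv N p ∈ PySem.List.sorted (PySem.Set.ofList
        ((p0 :: t).map (fun p => PySem.Int.floordiv N p))) (fun x => x) false := by
      rw [PySem.List.mem_sorted, PySem.Set.mem_ofList]
      exact List.mem_map_of_mem hp
    have hfold := pv_fold_get? _ hsorted _
      (PySem.List.sorted_ofList_pairwise_lt ((p0 :: t).map (fun p => PySem.Int.floordiv N p)))
      0 PySem.Dict.empty (Nat.zero_le _) (by intro l _ i _ h; omega) _ hmem
    rw [hfold, hcnt, Option.getD_some]
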